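-- pv_equiv track=rewrite | github.com/Panyouliang/00.Tools_v2 | 02.Genome_Anno_evaluate/genome_script/genome_N50_Guo.py | deal_scf
-- ===== SOURCE A (Python) =====
-- def deal_scf(scf,scfGC,scfN,scflen_l,ctgGC,ctglen_l,cutoff):
--
--     scf_seq = ''.join(scf).upper()
--     scfGC += scf_seq.count('G') + scf_seq.count('C')
--     scfN += scf_seq.count('N')
--     scflen_l.append(len(scf_seq))
--
--     ctg_l = [x for x in scf_seq.split('N') if len(x) >= cutoff and len(x) > 0]
--     ctgGC += sum([x.count('G') for x in ctg_l]) + sum([x.count('C') for x in ctg_l])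
--     ctglen_l.extend([len(x) for x in ctg_l])
--
--     return scfGC,scfN,scflen_l,ctgGC,ctglen_l
-- ===== SOURCE B (Python) =====
-- def deal_scf(scf, scfGC, scfN, scflen_l, ctgGC, ctglen_l, cutoff):
--     # One boundary-tracking pass over the joined sequence instead of
--     # multiple .count/.split passes; mutates scflen_l/ctglen_l in place like A.
--     scf_seq = ''.join(scf).upper()
--     cur_len = 0
--     cur_gc = 0
--     for ch in scf_seq:
--         if ch == 'N':
--             scfN += 1
--             if cur_len >= cutoff and cur_len > 0:
--                 ctgGC += cur_gc
--                 ctglen_l.append(cur_len)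
--             cur_len = 0
--             cur_gc = 0
--         else:
--             g = 1 if ch == 'G' or ch == 'C' else 0
--             scfGC += g
--             cur_gc += g
--             cur_len += 1
--     if cur_len >= cutoff and cur_len > 0:
--         ctgGC += cur_gc
--         ctglen_l.append(cur_len)
--     scflen_l.append(len(scf_seq))
--     return scfGC, scfN, scflen_l, ctgGC, ctglen_l
-- ===== Notes on version B (the rewrite author's own statement) =====
-- stated objective: alternative
-- what changed: Replaces A's multiple passes (two .count scans, a split('N') with a filtered comprehension, and per-contig .count scans) by a single boundary-tracking traversal of the joined sequence that maintains running scaffold counts and a current-contig length/GC closed at each 'N' and at the end.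
import Mathlib
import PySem

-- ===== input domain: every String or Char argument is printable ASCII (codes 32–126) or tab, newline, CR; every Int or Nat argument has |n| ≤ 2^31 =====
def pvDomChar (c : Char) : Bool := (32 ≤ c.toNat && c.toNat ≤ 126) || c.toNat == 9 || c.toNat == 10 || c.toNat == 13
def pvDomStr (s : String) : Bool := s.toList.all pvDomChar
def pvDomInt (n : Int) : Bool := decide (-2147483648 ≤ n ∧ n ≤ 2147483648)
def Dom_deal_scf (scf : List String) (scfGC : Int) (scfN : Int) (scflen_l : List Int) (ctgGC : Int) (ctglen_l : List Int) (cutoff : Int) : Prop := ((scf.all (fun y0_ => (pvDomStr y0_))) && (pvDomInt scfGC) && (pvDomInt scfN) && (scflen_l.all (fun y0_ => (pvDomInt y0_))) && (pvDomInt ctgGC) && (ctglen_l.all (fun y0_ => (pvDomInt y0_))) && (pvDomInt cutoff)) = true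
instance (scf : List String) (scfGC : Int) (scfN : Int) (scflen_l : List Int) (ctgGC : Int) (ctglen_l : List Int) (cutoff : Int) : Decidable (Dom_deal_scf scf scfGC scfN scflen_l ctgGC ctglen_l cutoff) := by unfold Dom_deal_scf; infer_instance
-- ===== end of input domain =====

-- B replaces A's multiple counting/splitting passes by one boundary-tracking traversal
-- of the joined sequence (objective: alternative decomposition, same return value;
-- the Python versions also mutate scflen_l/ctglen_l in place — equally in A and B).

-- ===== PORT A =====
def deal_scf (scf : List String) (scfGC : Int) (scfN : Int) (scflen_l : List Int) (ctgGC : Int) (ctglen_l : List Int) (cutoff : Int) : Int × Int × List Int × Int × List Int :=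
  let scf_seq := PySem.Str.upper (PySem.Str.join "" scf)
  let scfGC := scfGC + ((PySem.Str.count scf_seq "G" : Int) + (PySem.Str.count scf_seq "C" : Int))
  let scfN := scfN + (PySem.Str.count scf_seq "N" : Int)
  let scflen_l := scflen_l ++ [PySem.Str.len scf_seq]
  let ctg_l := (PySem.Chars.splitOn scf_seq.toList "N".toList).filter
      (fun x => decide (cutoff ≤ (x.length : Int)) && decide (0 < (x.length : Int)))
  let ctgGC := ctgGC + ((ctg_l.map (fun x => (PySem.Chars.count x "G".toList : Int))).sum
                      + (ctg_l.map (fun x => (PySem.Chars.count x "C".toList : Int))).sum)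
  let ctglen_l := ctglen_l ++ ctg_l.map (fun x => ((x.length : Int)))
  (scfGC, scfN, scflen_l, ctgGC, ctglen_l)

-- ===== PORT B =====
-- close the current contig: keep it iff cur_len >= cutoff and cur_len > 0
def dealClose (cutoff curLen curGC cg : Int) (cl : List Int) : Int × List Int :=
  if cutoff ≤ curLen ∧ 0 < curLen then (cg + curGC, cl ++ [curLen]) else (cg, cl)

-- the single 'for ch in scf_seq' loop; state = (scfGC, scfN, cur_len, cur_gc, ctgGC, ctglen_l)
def dealLoop (cutoff : Int) : List Char → (Int × Int × Int × Int × Int × List Int) → (Int × Int × Int × Int × Int × List Int)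
  | [], st => st
  | c :: rest, (gc, n, curLen, curGC, cg, cl) =>
    if c == 'N' then
      let p := dealClose cutoff curLen curGC cg cl
      dealLoop cutoff rest (gc, n + 1, 0, 0, p.1, p.2)
    else
      let g : Int := if c == 'G' || c == 'C' then 1 else 0
      dealLoop cutoff rest (gc + g, n, curLen + 1, curGC + g, cg, cl)

def deal_scf_alt (scf : List String) (scfGC : Int) (scfN : Int) (scflen_l : List Int) (ctgGC : Int) (ctglen_l : List Int) (cutoff : Int) : Int × Int × List Int × Int × List Int :=
  let scf_seq := PySem.Str.upper (PySem.Str.join "" scf)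
  let st := dealLoop cutoff scf_seq.toList (scfGC, scfN, 0, 0, ctgGC, ctglen_l)
  let p := dealClose cutoff st.2.2.1 st.2.2.2.1 st.2.2.2.2.1 st.2.2.2.2.2
  (st.1, st.2.1, scflen_l ++ [PySem.Str.len scf_seq], p.1, p.2)

-- ===== PRECONDITION & SPEC =====
def Spec_deal_scf (scf : List String) (scfGC : Int) (scfN : Int) (scflen_l : List Int) (ctgGC : Int) (ctglen_l : List Int) (cutoff : Int) (out : Int × Int × List Int × Int × List Int) : Prop := out = deal_scf_alt scf scfGC scfN scflen_l ctgGC ctglen_l cutoff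
instance (scf : List String) (scfGC : Int) (scfN : Int) (scflen_l : List Int) (ctgGC : Int) (ctglen_l : List Int) (cutoff : Int) (out : Int × Int × List Int × Int × List Int) : Decidable (Spec_deal_scf scf scfGC scfN scflen_l ctgGC ctglen_l cutoff out) := by unfold Spec_deal_scf; infer_instance

-- ===== CLAIM (what is proved, stated in full; the proofs are below) =====
def Claim_equal_deal_scf : Prop := ∀ (scf : List String) (scfGC : Int) (scfN : Int) (scflen_l : List Int) (ctgGC : Int) (ctglen_l : List Int) (cutoff : Int), Dom_deal_scf scf scfGC scfN scflen_l ctgGC ctglen_l cutoff → Spec_deal_scf scf scfGC scfN scflen_l ctgGC ctglen_l cutoff (deal_scf scf scfGC scfN scflen_l ctgGC ctglen_l cutoff)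

-- ===== LEMMAS AND PROOFS =====

-- a simple recursive presentation of s.split('N') on char lists
def mySplit : List Char → List (List Char)
  | [] => [[]]
  | c :: t =>
    if c = 'N' then [] :: mySplit t
    else
      match mySplit t with
      | [] => [[c]]
      | p :: ps => (c :: p) :: ps

theorem mySplit_ne_nil (l : List Char) : mySplit l ≠ [] := by
  induction l with
  | nil => simp [mySplit]
  | cons c t ih =>
    simp only [mySplit]
    split
    · simp
    · split <;> simp

-- prepend a prefix to the first piece
def consHead (pre : List Char) : List (List Char) → List (List Char)
  | [] => [pre]
  | p :: ps => (pre ++ p) :: ps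

theorem splitOn_go_char (l : List Char) : ∀ (fuel : Nat) (cur : List Char) (acc : List (List Char)),
    l.length ≤ fuel →
    PySem.Chars.splitOn.go ['N'] fuel l cur acc = acc.reverse ++ consHead cur.reverse (mySplit l) := by
  induction l with
  | nil =>
    intro fuel cur acc _
    cases fuel <;> simp [PySem.Chars.splitOn.go, mySplit, consHead]
  | cons c t ih =>
    intro fuel cur acc hf
    cases fuel with
    | zero => simp at hf
    | succ fuel =>
      by_cases hc : c = 'N'
      · subst hc
        simp only [PySem.Chars.splitOn.go, List.isPrefixOf, BEq.rfl, Bool.true_and,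
          if_true]
        simp only [List.length_cons, List.length_nil, List.drop_succ_cons, List.drop_zero]
        rw [ih fuel [] (cur.reverse :: acc) (by simpa using Nat.le_of_succ_le_succ hf)]
        simp only [mySplit, if_pos rfl, List.reverse_nil, List.reverse_cons,
          List.append_assoc]
        cases h : mySplit t with
        | nil => exact absurd h (mySplit_ne_nil t)
        | cons p ps => simp [consHead]
      · have hbe : (['N'].isPrefixOf (c :: t)) = false := by
          simp [List.isPrefixOf]; exact fun h => (hc h.symm).elim
        simp only [PySem.Chars.splitOn.go, hbe, if_neg, Bool.false_eq_true, not_false_iff]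
        rw [ih fuel (c :: cur) acc (Nat.le_of_succ_le_succ hf)]
        simp only [mySplit, if_neg hc, List.reverse_cons]
        cases h : mySplit t with
        | nil => exact absurd h (mySplit_ne_nil t)
        | cons p ps => simp [consHead]

theorem splitOn_char (l : List Char) : PySem.Chars.splitOn l ['N'] = mySplit l := by
  unfold PySem.Chars.splitOn
  rw [splitOn_go_char l (l.length + 1) [] [] (Nat.le_succ _)]
  cases h : mySplit l with
  | nil => exact absurd h (mySplit_ne_nil l)
  | cons p ps => simp [consHead]

theorem count_go_char (ch : Char) (l : List Char) : ∀ (fuel : Nat) (acc : Nat),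
    l.length ≤ fuel →
    PySem.Chars.count.go [ch] fuel l acc = acc + l.count ch := by
  induction l with
  | nil => intro fuel acc _; cases fuel <;> simp [PySem.Chars.count.go]
  | cons c t ih =>
    intro fuel acc hf
    cases fuel with
    | zero => simp at hf
    | succ fuel =>
      by_cases hc : ch = c
      · subst hc
        simp only [PySem.Chars.count.go, List.isPrefixOf, BEq.rfl, Bool.true_and,
          if_true]
        simp only [List.length_cons, List.length_nil, List.drop_succ_cons, List.drop_zero]
        rw [ih fuel (acc + 1) (Nat.le_of_succ_le_succ hf)]
        simp [List.count_cons]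
        omega
      · have hbe : ([ch].isPrefixOf (c :: t)) = false := by
          simp [List.isPrefixOf]; exact fun h => (hc h).elim
        simp only [PySem.Chars.count.go, hbe, Bool.false_eq_true, if_neg, not_false_iff]
        rw [ih fuel acc (Nat.le_of_succ_le_succ hf)]
        have : (c == ch) = false := by simp; exact fun h => hc h.symm
        simp [List.count_cons, this]

theorem count_char (l : List Char) (ch : Char) : PySem.Chars.count l [ch] = l.count ch := by
  unfold PySem.Chars.count
  simp only [List.isEmpty_cons, if_neg, Bool.false_eq_true, not_false_iff]
  rw [count_go_char ch l l.length 0 (le_refl _)]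
  simp

-- per-piece stats: (length, GC count) of every contig piece, first piece open at the front
def pieceStat (p : List Char) : Int × Int :=
  ((p.length : Int), ((p.count 'G' : Int) + (p.count 'C' : Int)))

def addHead (a b : Int) : List (Int × Int) → List (Int × Int)
  | [] => [(a, b)]
  | (x, y) :: r => (a + x, b + y) :: r

def foldPieces (cutoff : Int) : Int × List Int → List (Int × Int) → Int × List Int
  | p, [] => p
  | p, (len, g) :: r => foldPieces cutoff (dealClose cutoff len g p.1 p.2) r

def gcCnt (l : List Char) : Int := (l.countP (fun c => c == 'G' || c == 'C') : Int)

theorem stats_ne_nil (l : List Char) : (mySplit l).map pieceStat ≠ [] := by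
  intro h
  exact mySplit_ne_nil l (List.map_eq_nil_iff.mp h)

theorem addHead_addHead (a b c d : Int) (s : List (Int × Int)) :
    addHead a b (addHead c d s) = addHead (a + c) (b + d) s := by
  cases s with
  | nil => rfl
  | cons p r =>
    cases p with
    | mk x y =>
      simp only [addHead, List.cons.injEq, Prod.mk.injEq]
      exact ⟨⟨by ring, by ring⟩, trivial⟩

theorem addHead_zero (s : List (Int × Int)) (h : s ≠ []) : addHead 0 0 s = s := by
  cases s with
  | nil => exact absurd rfl h
  | cons p r => cases p; simp [addHead]

-- the single-pass loop followed by the final close computes exactly the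
-- scaffold counts plus the close-fold of the piece statistics
theorem dealLoop_spec (cutoff : Int) (l : List Char) :
    ∀ (gc n curLen curGC cg : Int) (cl : List Int),
    (let st := dealLoop cutoff l (gc, n, curLen, curGC, cg, cl)
     (st.1, st.2.1, dealClose cutoff st.2.2.1 st.2.2.2.1 st.2.2.2.2.1 st.2.2.2.2.2))
    = (gc + gcCnt l, n + (l.count 'N' : Int),
       foldPieces cutoff (cg, cl) (addHead curLen curGC ((mySplit l).map pieceStat))) := by
  induction l with
  | nil =>
    intro gc n curLen curGC cg cl
    simp [dealLoop, mySplit, pieceStat, addHead, foldPieces, gcCnt]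
  | cons c t ih =>
    intro gc n curLen curGC cg cl
    by_cases hc : c = 'N'
    · subst hc
      simp only [dealLoop, BEq.rfl, if_true]
      rw [ih]
      simp only [mySplit, if_true, List.map_cons]
      have hne := stats_ne_nil t
      simp only [pieceStat, List.length_nil, Nat.cast_zero, List.count_nil, add_zero,
        Int.add_zero]
      rw [addHead_zero _ hne]
      have : addHead curLen curGC ((0, 0) :: (mySplit t).map pieceStat)
          = (curLen, curGC) :: (mySplit t).map pieceStat := by
        simp [addHead]
      rw [this]
      simp only [foldPieces]
      have hgc : gcCnt ('N' :: t) = gcCnt t := by simp [gcCnt, List.countP_cons]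
      have hn : (('N' :: t).count 'N' : Int) = (t.count 'N' : Int) + 1 := by
        simp [List.count_cons]
      rw [hgc, hn]
      ring_nf
    · have hbe : (c == 'N') = false := by simp [hc]
      simp only [dealLoop, hbe, Bool.false_eq_true, if_neg, not_false_iff]
      rw [ih]
      have hn : ((c :: t).count 'N' : Int) = (t.count 'N' : Int) := by
        simp [List.count_cons, hbe]
      have hgc : gcCnt (c :: t) = (if c == 'G' || c == 'C' then (1 : Int) else 0) + gcCnt t := by
        simp only [gcCnt, List.countP_cons]
        split <;> simp_all <;> ring
      have hsplit : (mySplit (c :: t)).map pieceStat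
          = addHead 1 (if c == 'G' || c == 'C' then (1 : Int) else 0) ((mySplit t).map pieceStat) := by
        simp only [mySplit, if_neg hc]
        cases h : mySplit t with
        | nil => exact absurd h (mySplit_ne_nil t)
        | cons p ps =>
          simp only [List.map_cons, addHead, pieceStat, List.length_cons, List.count_cons,
            List.cons.injEq, Prod.mk.injEq, true_and, and_true]
          refine ⟨by push_cast; ring, ?_⟩
          by_cases hG : c = 'G'
          · subst hG; simp; push_cast; ring
          · by_cases hC : c = 'C'
            · subst hC; simp; push_cast; ring
            · have h1 : (c == 'G') = false := by simp [hG]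
              have h2 : (c == 'C') = false := by simp [hC]
              simp [h1, h2]
      rw [hn, hgc, hsplit, addHead_addHead]
      ring_nf

-- the A-side filter/sum/map passes over the pieces equal the close-fold
theorem foldPieces_eq_filter (cutoff : Int) (ps : List (List Char)) :
    ∀ (cg : Int) (cl : List Int),
    foldPieces cutoff (cg, cl) (ps.map pieceStat)
    = (cg + (((ps.filter (fun x => decide (cutoff ≤ (x.length : Int)) && decide (0 < (x.length : Int)))).map
          (fun x => ((x.count 'G' : Int) + (x.count 'C' : Int)))).sum),
       cl ++ (ps.filter (fun x => decide (cutoff ≤ (x.length : Int)) && decide (0 < (x.length : Int)))).map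
          (fun x => ((x.length : Int)))) := by
  induction ps with
  | nil => intro cg cl; simp [foldPieces]
  | cons p r ih =>
    intro cg cl
    simp only [List.map_cons, foldPieces, pieceStat, List.filter_cons, dealClose]
    by_cases h : cutoff ≤ (p.length : Int) ∧ 0 < (p.length : Int)
    · rw [if_pos h, ih]
      have : (decide (cutoff ≤ (p.length : Int)) && decide (0 < (p.length : Int))) = true := by
        rw [Bool.and_eq_true, decide_eq_true_eq, decide_eq_true_eq]; exact h
      simp only [this, if_true, List.map_cons, List.sum_cons, Prod.mk.injEq]
      exact ⟨by ring, by simp⟩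
    · have : (decide (cutoff ≤ (p.length : Int)) && decide (0 < (p.length : Int))) = false := by
        rw [Bool.and_eq_false_iff]
        rcases not_and_or.mp h with h1 | h1
        · exact Or.inl (decide_eq_false h1)
        · exact Or.inr (decide_eq_false h1)
      rw [if_neg h, ih, this]
      simp

-- separate G- and C-count sums over the pieces combine into one GC sum
theorem sum_counts_combine (ps : List (List Char)) :
    (ps.map (fun x => (PySem.Chars.count x "G".toList : Int))).sum
      + (ps.map (fun x => (PySem.Chars.count x "C".toList : Int))).sum
    = (ps.map (fun x => ((x.count 'G' : Int) + (x.count 'C' : Int)))).sum := by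
  induction ps with
  | nil => simp
  | cons p r ih =>
    simp only [List.map_cons, List.sum_cons]
    have hg : "G".toList = ['G'] := rfl
    have hc : "C".toList = ['C'] := rfl
    rw [hg, hc] at ih ⊢
    rw [count_char, count_char, ← ih]
    ring

-- scaffold GC count: count 'G' + count 'C' equals the one-pass countP
theorem gcCnt_eq (l : List Char) : (l.count 'G' : Int) + (l.count 'C' : Int) = gcCnt l := by
  induction l with
  | nil => simp [gcCnt]
  | cons c t ih =>
    simp only [gcCnt, List.count_cons, List.countP_cons] at *
    by_cases hG : c = 'G'
    · subst hG; simp at *; push_cast; omega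
    · by_cases hC : c = 'C'
      · subst hC; simp at *; push_cast; omega
      · have h1 : (c == 'G') = false := by simp [hG]
        have h2 : (c == 'C') = false := by simp [hC]
        simp [h1, h2] at *; omega

-- ===== VERDICT (by name: the statement is the Claim_ definition above) =====
theorem deal_scf_spec : Claim_equal_deal_scf := by
  intro scf scfGC scfN scflen_l ctgGC ctglen_l cutoff _
  unfold Spec_deal_scf deal_scf deal_scf_alt
  have hmain := dealLoop_spec cutoff (PySem.Str.upper (PySem.Str.join "" scf)).toList
    scfGC scfN 0 0 ctgGC ctglen_l
  simp only at hmain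
  set seq := (PySem.Str.upper (PySem.Str.join "" scf)).toList with hseq
  rw [addHead_zero _ (stats_ne_nil seq)] at hmain
  rw [foldPieces_eq_filter] at hmain
  simp only [Prod.mk.injEq] at hmain
  obtain ⟨h1, h2, h3⟩ := hmain
  obtain ⟨h4, h5⟩ := Prod.ext_iff.mp h3
  simp only [Prod.mk.injEq]
  refine ⟨?_, ?_, trivial, ?_, ?_⟩
  · rw [h1]
    have : PySem.Str.count (PySem.Str.upper (PySem.Str.join "" scf)) "G" = seq.count 'G' := by
      rw [PySem.Str.count_eq]; exact count_char _ _
    have hc : PySem.Str.count (PySem.Str.upper (PySem.Str.join "" scf)) "C" = seq.count 'C' := by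
      rw [PySem.Str.count_eq]; exact count_char _ _
    rw [this, hc, gcCnt_eq]
  · rw [h2]
    have : PySem.Str.count (PySem.Str.upper (PySem.Str.join "" scf)) "N" = seq.count 'N' := by
      rw [PySem.Str.count_eq]; exact count_char _ _
    rw [this]
  · have hn : "N".toList = ['N'] := rfl
    rw [hn, splitOn_char, h4, sum_counts_combine]
  · have hn : "N".toList = ['N'] := rfl
    rw [hn, splitOn_char, h5]
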